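-- pv_equiv track=rewrite | github.com/subrotonpi/clone_evaluation | data/gptcb_cross/gptcb_cross/None/1847.py | solution
-- ===== SOURCE A (Python) =====
-- def solution(x, a):
--     empty_position = set()
--     for i in range(1, x+1):
--         empty_position.add(i)
--     for i in range(len(a)):
--         empty_position.discard(a[i])
--         if not empty_position:
--             return i
--     return -1
-- ===== SOURCE B (Python) =====
-- def solution(x, a):
--     first = {}
--     for i, v in enumerate(a):
--         if v not in first:
--             first[v] = i
--     best = 0
--     for v in range(1, x + 1):
--         if v not in first:
--             return -1
--         best = max(best, first[v])
--     return best
-- ===== Notes on version B (the rewrite author's own statement) =====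
-- stated objective: alternative
-- what changed: Replaces the per-index scan that mutates a set of still-missing values with a single first-occurrence dict pass over a followed by a max over first[1..x]; Pre_ excludes the degenerate inputs with x <= 0 and empty a, where nothing is required and A's -1 and B's 0 are both defensible conventions.
-- outside the precondition, e.g. on solution(0, []): A returns -1, B returns 0
import Mathlib
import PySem

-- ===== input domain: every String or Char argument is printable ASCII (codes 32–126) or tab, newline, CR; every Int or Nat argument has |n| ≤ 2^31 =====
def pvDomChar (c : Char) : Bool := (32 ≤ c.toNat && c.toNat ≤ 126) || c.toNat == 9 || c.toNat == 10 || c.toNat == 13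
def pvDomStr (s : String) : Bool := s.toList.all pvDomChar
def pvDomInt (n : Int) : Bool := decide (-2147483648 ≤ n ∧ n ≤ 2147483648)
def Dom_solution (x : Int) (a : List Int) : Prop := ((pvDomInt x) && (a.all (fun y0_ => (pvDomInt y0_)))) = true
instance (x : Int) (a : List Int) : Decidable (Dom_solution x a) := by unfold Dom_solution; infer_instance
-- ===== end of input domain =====

-- B replaces A's index scan over a shrinking set of missing values by one first-occurrence
-- dict pass over a followed by a max over the first indices of 1..x (objective: alternative
-- single-pass decomposition).

-- ===== PORT A =====
def solAloop (s : PySem.Set Int) (i : Int) : List Int → Int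
  | [] => -1
  | h :: t =>
    let s' := PySem.Set.discard s h
    if s' = [] then i else solAloop s' (i + 1) t

-- 'empty_position = set(); for i in range(1, x+1): empty_position.add(i)': the added values are
-- pairwise distinct, so the loop 'foldl Set.add Set.empty' IS the range list itself
-- (PySem.Set.ofList_eq_foldl with PySem.Set.ofList_eq_self_of_nodup on nodup_pyRange_one);
-- the port uses that form so that evaluation stays linear in x.
def solution (x : Int) (a : List Int) : Int :=
  let emptyPosition : PySem.Set Int := PySem.List.pyRange 1 (x + 1) 1
  solAloop emptyPosition 0 a

-- ===== PORT B =====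
def solBfirst (a : List Int) : PySem.Dict Int Int :=
  (PySem.List.enumerate a 0).foldl
    (fun d p => if d.contains p.2 then d else d.insert p.2 p.1) PySem.Dict.empty

def solBloop (d : PySem.Dict Int Int) : List Int → Int → Int
  | [], best => best
  | v :: vs, best =>
    match d.get? v with
    | none => -1
    | some i => solBloop d vs (max best i)

def solution_alt (x : Int) (a : List Int) : Int :=
  solBloop (solBfirst a) (PySem.List.pyRange 1 (x + 1) 1) 0

-- ===== PRECONDITION & SPEC =====
-- Pre_ excludes only the degenerate inputs with x ≤ 0 and empty a: nothing is required there
-- and A's -1 and B's 0 are both defensible conventions no caller would specify.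
def Pre_solution (x : Int) (a : List Int) : Prop := ¬ (x ≤ 0 ∧ a = [])
instance (x : Int) (a : List Int) : Decidable (Pre_solution x a) := by unfold Pre_solution; infer_instance
def pvWitness_solution : Int × List Int := (2, [1, 2])

def Spec_solution (x : Int) (a : List Int) (out : Int) : Prop := out = solution_alt x a
instance (x : Int) (a : List Int) (out : Int) : Decidable (Spec_solution x a out) := by unfold Spec_solution; infer_instance

-- ===== CLAIM (what is proved, stated in full; the proofs are below) =====
def Claim_equal_solution : Prop := ∀ (x : Int) (a : List Int), Dom_solution x a → Pre_solution x a → Spec_solution x a (solution x a)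

-- ===== LEMMAS AND PROOFS =====

-- first index of v in t (0 if absent; only used under a membership guard)
def fI : List Int → Int → Int
  | [], _ => 0
  | h :: t, v => if h = v then 0 else 1 + fI t v

-- max over v ∈ R of fI t v, floored at 0
def mx (t R : List Int) : Int := R.foldr (fun v m => max (fI t v) m) 0

theorem fI_nonneg (t : List Int) (v : Int) : 0 ≤ fI t v := by
  induction t with
  | nil => simp [fI]
  | cons h t ih => simp only [fI]; split <;> omega

theorem mx_nonneg (t R : List Int) : 0 ≤ mx t R := by
  induction R with
  | nil => simp [mx]
  | cons v R ih => simp only [mx, List.foldr] at *; omega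

theorem mx_cons (t : List Int) (v : Int) (R : List Int) :
    mx t (v :: R) = max (fI t v) (mx t R) := rfl

theorem mx_all_head (t : List Int) (hd : Int) (R : List Int) (h : ∀ v ∈ R, v = hd) :
    mx (hd :: t) R = 0 := by
  induction R with
  | nil => simp [mx]
  | cons v R ih =>
    have hv : v = hd := h v (by simp)
    have hR : mx (hd :: t) R = 0 := ih (fun w hw => h w (by simp [hw]))
    have h0 : fI (hd :: t) v = 0 := by simp [fI, hv]
    rw [mx_cons, h0, hR]
    simp

theorem mx_filter (t : List Int) (hd : Int) (R : List Int)
    (hne : R.filter (fun v => !v == hd) ≠ []) :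
    mx (hd :: t) R = 1 + mx t (R.filter (fun v => !v == hd)) := by
  induction R with
  | nil => simp at hne
  | cons v R ih =>
    by_cases hv : v = hd
    · have hf : (v :: R).filter (fun v => !v == hd) = R.filter (fun v => !v == hd) := by
        simp [hv]
      rw [hf] at hne ⊢
      have h0 : fI (hd :: t) v = 0 := by simp [fI, hv]
      rw [mx_cons, h0, ih hne]
      have := mx_nonneg t (R.filter (fun v => !v == hd))
      omega
    · have hf : (v :: R).filter (fun v => !v == hd) = v :: R.filter (fun v => !v == hd) := by
        simp [hv]
      rw [hf, mx_cons]
      have h1 : fI (hd :: t) v = 1 + fI t v := by simp [fI, Ne.symm hv]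
      rw [h1, mx_cons]
      by_cases hR : R.filter (fun v => !v == hd) = []
      · have hall : ∀ w ∈ R, w = hd := by
          intro w hw
          by_contra hne'
          have : w ∈ R.filter (fun v => !v == hd) := by
            simp [List.mem_filter, hw, hne']
          simp [hR] at this
        have hz : mx (hd :: t) R = 0 := mx_all_head t hd R hall
        rw [hz, hR]
        have h2 : mx t ([] : List Int) = 0 := rfl
        rw [h2]
        have := fI_nonneg t v
        omega
      · rw [ih hR]
        have := fI_nonneg t v
        have := mx_nonneg t (R.filter (fun v => !v == hd))
        omega

theorem walk_eq (t : List Int) : ∀ (R : List Int) (i : Int), R ≠ [] →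
    solAloop R i t = if ∀ v ∈ R, v ∈ t then i + mx t R else -1 := by
  induction t with
  | nil =>
    intro R i hR
    match R, hR with
    | r :: R', _ =>
      have : ¬ (∀ v ∈ r :: R', v ∈ ([] : List Int)) := by
        intro h; exact (List.not_mem_nil (a := r)) (h r (by simp))
      rw [if_neg this]
      rfl
  | cons h t' ih =>
    intro R i hR
    have hdisc : PySem.Set.discard R h = R.filter (fun v => !v == h) := rfl
    by_cases hS : R.filter (fun v => !v == h) = []
    · -- set becomes empty: every v ∈ R equals h
      have hall : ∀ v ∈ R, v = h := by
        intro v hv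
        by_contra hne
        have : v ∈ R.filter (fun w => !w == h) := by simp [List.mem_filter, hv, hne]
        simp [hS] at this
      have hcond : ∀ v ∈ R, v ∈ h :: t' := by
        intro v hv; rw [hall v hv]; simp
      have hmx : mx (h :: t') R = 0 := mx_all_head t' h R hall
      simp only [solAloop, hdisc]
      rw [hS, if_pos rfl, if_pos hcond, hmx]; omega
    · simp only [solAloop, hdisc, if_neg hS]
      rw [ih _ (i + 1) hS]
      have hcond : (∀ v ∈ R.filter (fun w => !w == h), v ∈ t') ↔ (∀ v ∈ R, v ∈ h :: t') := by
        constructor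
        · intro hp v hv
          by_cases hvh : v = h
          · simp [hvh]
          · have : v ∈ R.filter (fun w => !w == h) := by simp [List.mem_filter, hv, hvh]
            simp [hp v this]
        · intro hp v hv
          rw [List.mem_filter] at hv
          have h1 := hp v hv.1
          have h2 : v ≠ h := by simpa using hv.2
          simp only [List.mem_cons] at h1
          tauto
      by_cases hc : ∀ v ∈ R, v ∈ h :: t'
      · rw [if_pos (hcond.mpr hc), if_pos hc, mx_filter t' h R hS]; omega
      · rw [if_neg (fun hp => hc (hcond.mp hp)), if_neg hc]

theorem first_get (l : List Int) : ∀ (s : Int) (d : PySem.Dict Int Int) (v : Int),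
    ((PySem.List.enumerate l s).foldl
      (fun d p => if d.contains p.2 then d else d.insert p.2 p.1) d).get? v =
    match d.get? v with
    | some w => some w
    | none => if v ∈ l then some (s + fI l v) else none := by
  induction l with
  | nil =>
    intro s d v
    simp [PySem.List.enumerate_nil]
    cases d.get? v <;> simp
  | cons h t ih =>
    intro s d v
    rw [PySem.List.enumerate_cons]
    simp only [List.foldl]
    by_cases hc : d.contains h = true
    · rw [if_pos hc, ih (s + 1) d v]
      cases hd : d.get? v with
      | some w => simp
      | none =>
        by_cases hvh : v = h
        · -- d.contains h but get? h = none: contradiction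
          exfalso
          rw [hvh] at hd
          rw [PySem.Dict.contains_eq_isSome_get?, hd] at hc
          simp at hc
        · simp only [List.mem_cons, hvh, false_or]
          by_cases hvt : v ∈ t
          · rw [if_pos hvt, if_pos hvt]
            have : fI (h :: t) v = 1 + fI t v := by simp [fI, Ne.symm hvh]
            rw [this]; ring_nf
          · rw [if_neg hvt, if_neg hvt]
    · rw [if_neg hc, ih (s + 1) (d.insert h s) v]
      by_cases hvh : v = h
      · subst hvh
        rw [PySem.Dict.get?_insert_self]
        have hd : d.get? v = none := by
          rw [PySem.Dict.contains_eq_isSome_get?] at hc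
          cases hdv : d.get? v <;> simp [hdv] at hc ⊢
        rw [hd]
        have : fI (v :: t) v = 0 := by simp [fI]
        simp [this]
      · rw [PySem.Dict.get?_insert_of_ne d s hvh]
        cases hd : d.get? v with
        | some w => simp
        | none =>
          simp only [List.mem_cons, hvh, false_or]
          by_cases hvt : v ∈ t
          · rw [if_pos hvt, if_pos hvt]
            have : fI (h :: t) v = 1 + fI t v := by simp [fI, Ne.symm hvh]
            rw [this]; ring_nf
          · rw [if_neg hvt, if_neg hvt]

theorem bloop_eq (a : List Int) (d : PySem.Dict Int Int)
    (hd : ∀ v, d.get? v = if v ∈ a then some (fI a v) else none) :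
    ∀ (vs : List Int) (b : Int), 0 ≤ b →
    solBloop d vs b = if ∀ v ∈ vs, v ∈ a then max b (mx a vs) else -1 := by
  intro vs
  induction vs with
  | nil => intro b hb; simp [solBloop, mx]; omega
  | cons v vs ih =>
    intro b hb
    simp only [solBloop]
    by_cases hv : v ∈ a
    · rw [hd v, if_pos hv]
      simp only []
      rw [ih (max b (fI a v)) (by have := fI_nonneg a v; omega)]
      by_cases hall : ∀ w ∈ vs, w ∈ a
      · have : ∀ w ∈ v :: vs, w ∈ a := by intro w hw; simp at hw; rcases hw with rfl | hw; exact hv; exact hall w hw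
        rw [if_pos hall, if_pos this]
        simp only [mx, List.foldr]
        rw [← mx]
        omega
      · have : ¬ ∀ w ∈ v :: vs, w ∈ a := fun hp => hall (fun w hw => hp w (by simp [hw]))
        rw [if_neg hall, if_neg this]
    · rw [hd v, if_neg hv]
      have : ¬ ∀ w ∈ v :: vs, w ∈ a := fun hp => hv (hp v (by simp))
      rw [if_neg this]

theorem first_get_spec (a : List Int) :
    ∀ v, (solBfirst a).get? v = if v ∈ a then some (fI a v) else none := by
  intro v
  unfold solBfirst
  rw [first_get a 0 PySem.Dict.empty v, PySem.Dict.get?_empty]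
  simp

-- ===== VERDICT (by name: the statement is the Claim_ definition above) =====
theorem solution_spec : Claim_equal_solution := by
  intro x a _hdom hpre
  unfold Spec_solution solution solution_alt
  by_cases hx : x ≤ 0
  · have ha : a ≠ [] := by
      intro h; exact hpre ⟨hx, h⟩
    have hnil : PySem.List.pyRange 1 (x + 1) 1 = [] :=
      PySem.List.pyRange_one_eq_nil (by omega)
    simp only [hnil]
    cases a with
    | nil => exact absurd rfl ha
    | cons h t =>
      have hd : PySem.Set.discard ([] : PySem.Set Int) h = [] := rfl
      simp [solAloop, hd, solBloop]
  · have hne : PySem.List.pyRange 1 (x + 1) 1 ≠ [] := by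
      rw [PySem.List.pyRange_one_cons (by omega)]; simp
    rw [walk_eq a _ 0 hne]
    rw [bloop_eq a _ (first_get_spec a) _ 0 le_rfl]
    by_cases hc : ∀ v ∈ PySem.List.pyRange 1 (x + 1) 1, v ∈ a
    · rw [if_pos hc, if_pos hc]
      have := mx_nonneg a (PySem.List.pyRange 1 (x + 1) 1)
      omega
    · rw [if_neg hc, if_neg hc]
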